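-- pv_equiv track=rewrite | github.com/eggerj/cospliceModNet | remove_redundant_LSVs.py | store_redundant_pairs
-- ===== SOURCE A (Python) =====
-- def store_redundant_pairs(lsv_dict, pairs):
--
--     redundant_lsvs = {}
--
--     for pair in pairs:
--         source, target = pair[0], pair[1]
--         if target in redundant_lsvs:
--             redundant_lsvs[target] = redundant_lsvs[target] + '|' + source
--         else:
--             redundant_lsvs[target] = source
--         if source in redundant_lsvs:
--             redundant_lsvs[source] = redundant_lsvs[source] + '|' + target
--         else:
--             redundant_lsvs[source] = target
--
--     # Store remaining LSVs as having no redundant pairing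
--     for lsv in lsv_dict.keys():
--         if lsv not in redundant_lsvs:
--             redundant_lsvs[lsv] = 'NaN'
--
--     return lsv_dict, redundant_lsvs
-- ===== SOURCE B (Python) =====
-- def store_redundant_pairs(lsv_dict, pairs):
--     # Flatten the pairs into a directed "event" list, then group-by key:
--     # for each key at its first appearance, join all of its partners at once.
--     events = [kv for s, t in pairs for kv in ((t, s), (s, t))]
--     redundant_lsvs = {}
--     for k, _ in events:
--         if k not in redundant_lsvs:
--             redundant_lsvs[k] = '|'.join(p for k2, p in events if k2 == k)
--     for lsv in lsv_dict:
--         if lsv not in redundant_lsvs: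
--             redundant_lsvs[lsv] = 'NaN'
--     return lsv_dict, redundant_lsvs
-- ===== Notes on version B (the rewrite author's own statement) =====
-- stated objective: alternative
-- what changed: B replaces A's incremental string-growing dict updates by a staged group-by: it flattens the pairs into a directed event list, then for each key at its first appearance builds its whole '|'-joined partner string in one scan of the event list, before the same NaN fill.
import Mathlib
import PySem

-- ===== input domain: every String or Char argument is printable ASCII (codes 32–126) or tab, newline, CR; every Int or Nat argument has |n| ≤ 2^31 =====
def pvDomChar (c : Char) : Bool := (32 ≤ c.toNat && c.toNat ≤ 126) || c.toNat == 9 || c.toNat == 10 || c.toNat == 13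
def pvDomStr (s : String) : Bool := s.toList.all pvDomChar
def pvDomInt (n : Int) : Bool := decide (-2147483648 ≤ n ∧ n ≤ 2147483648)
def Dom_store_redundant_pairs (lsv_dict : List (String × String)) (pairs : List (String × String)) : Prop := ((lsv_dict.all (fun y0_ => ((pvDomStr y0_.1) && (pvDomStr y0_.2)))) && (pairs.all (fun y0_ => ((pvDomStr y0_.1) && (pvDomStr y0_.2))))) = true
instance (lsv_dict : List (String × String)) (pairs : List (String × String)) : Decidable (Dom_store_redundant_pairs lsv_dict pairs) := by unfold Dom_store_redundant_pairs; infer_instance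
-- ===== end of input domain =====

-- B is a staged group-by: it flattens the pairs into a directed event list, then for each key at
-- its first appearance joins all of its partners in one scan, instead of A's incremental
-- string-growing dict updates (objective: alternative).

-- ===== PORT A =====
def store_redundant_pairs (lsv_dict : List (String × String)) (pairs : List (String × String)) : (List (String × String)) × (List (String × String)) :=
  let redundant_lsvs : PySem.Dict String String :=
    pairs.foldl (fun d pair =>
      let source := pair.1
      let target := pair.2
      let d :=
        if d.contains target then d.insert target (d.getD target "" ++ "|" ++ source)
        else d.insert target source
      if d.contains source then d.insert source (d.getD source "" ++ "|" ++ target)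
      else d.insert source target) PySem.Dict.empty
  let redundant_lsvs := lsv_dict.foldl (fun d kv =>
      if d.contains kv.1 then d else d.insert kv.1 "NaN") redundant_lsvs
  (lsv_dict, redundant_lsvs.items)

-- ===== PORT B =====
-- the flattened directed event list: each pair (s, t) contributes (t, s) then (s, t)
def pvEvents (pairs : List (String × String)) : List (String × String) :=
  pairs.flatMap (fun p => [(p.2, p.1), (p.1, p.2)])

-- '|'.join(p for k2, p in events if k2 == k)
def pvJoined (events : List (String × String)) (k : String) : String :=
  PySem.Str.join "|" ((events.filter (fun e2 => e2.1 == k)).map (·.2))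

def store_redundant_pairs_alt (lsv_dict : List (String × String)) (pairs : List (String × String)) : (List (String × String)) × (List (String × String)) :=
  let events := pvEvents pairs
  let redundant_lsvs : PySem.Dict String String :=
    events.foldl (fun d e =>
      if d.contains e.1 then d else d.insert e.1 (pvJoined events e.1)) PySem.Dict.empty
  let redundant_lsvs := lsv_dict.foldl (fun d kv =>
      if d.contains kv.1 then d else d.insert kv.1 "NaN") redundant_lsvs
  (lsv_dict, redundant_lsvs.items)

-- ===== PRECONDITION & SPEC =====
def Spec_store_redundant_pairs (lsv_dict : List (String × String)) (pairs : List (String × String)) (out : (List (String × String)) × (List (String × String))) : Prop := out = store_redundant_pairs_alt lsv_dict pairs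
instance (lsv_dict : List (String × String)) (pairs : List (String × String)) (out : (List (String × String)) × (List (String × String))) : Decidable (Spec_store_redundant_pairs lsv_dict pairs out) := by unfold Spec_store_redundant_pairs; infer_instance

-- ===== CLAIM (what is proved, stated in full; the proofs are below) =====
def Claim_equal_store_redundant_pairs : Prop := ∀ (lsv_dict : List (String × String)) (pairs : List (String × String)), Dom_store_redundant_pairs lsv_dict pairs → Spec_store_redundant_pairs lsv_dict pairs (store_redundant_pairs lsv_dict pairs)

-- ===== LEMMAS AND PROOFS =====

-- A's per-key update step
def pvStepA (d : PySem.Dict String String) (k s : String) : PySem.Dict String String :=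
  if d.contains k then d.insert k (d.getD k "" ++ "|" ++ s) else d.insert k s

-- list-valued model of the per-key update
def pvStepL (d : PySem.Dict String (List String)) (k s : String) : PySem.Dict String (List String) :=
  d.insert k (d.getD k [] ++ [s])

-- the value-wise join of the list-valued dict
def pvPhi (d : PySem.Dict String (List String)) : PySem.Dict String String :=
  PySem.Dict.mk (d.items.map (fun kv => (kv.1, PySem.Str.join "|" kv.2)))

def pvInv (d : PySem.Dict String (List String)) : Prop :=
  d.keys.Nodup ∧ ∀ kv ∈ d.items, kv.2 ≠ []

theorem pvJoin_singleton (s : String) : PySem.Str.join "|" [s] = s := by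
  rw [← String.toList_inj, PySem.Str.toList_join]
  simp [PySem.Chars.join_singleton]

theorem pvJoin_append {l : List String} (h : l ≠ []) (s : String) :
    PySem.Str.join "|" (l ++ [s]) = PySem.Str.join "|" l ++ "|" ++ s := by
  rw [← String.toList_inj, PySem.Str.toList_join, String.toList_append, String.toList_append,
    PySem.Str.toList_join]
  induction l with
  | nil => exact absurd rfl h
  | cons a t ih =>
    cases t with
    | nil => simp [PySem.Chars.join_cons_cons, PySem.Chars.join_singleton]
    | cons b u =>
      simp only [List.cons_append, List.map_cons, PySem.Chars.join_cons_cons] at *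
      rw [ih (by simp)]
      simp [List.append_assoc]

theorem pvPhi_get? (d : PySem.Dict String (List String)) (k : String) :
    (pvPhi d).get? k = (d.get? k).map (PySem.Str.join "|") := by
  obtain ⟨items⟩ := d
  induction items with
  | nil => rfl
  | cons p rest ih =>
    obtain ⟨pk, pv⟩ := p
    simp only [pvPhi, List.map_cons, PySem.Dict.get?_mk_cons] at *
    split_ifs with h
    · rfl
    · exact ih

theorem pvPhi_contains (d : PySem.Dict String (List String)) (k : String) :
    (pvPhi d).contains k = d.contains k := by
  rw [PySem.Dict.contains_eq_isSome_get?, PySem.Dict.contains_eq_isSome_get?, pvPhi_get?]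
  cases d.get? k <;> rfl

theorem pvPhi_keys (d : PySem.Dict String (List String)) : (pvPhi d).keys = d.keys := by
  simp [pvPhi, PySem.Dict.keys]

theorem pvStep_comm (d : PySem.Dict String (List String)) (h : pvInv d) (k s : String) :
    pvStepA (pvPhi d) k s = pvPhi (pvStepL d k s) := by
  unfold pvStepA pvStepL
  rw [pvPhi_contains]
  by_cases hc : d.contains k = true
  · have hget : ∃ v, d.get? k = some v := by
      rw [PySem.Dict.contains_eq_isSome_get?] at hc
      cases hv : d.get? k with
      | none => rw [hv] at hc; simp at hc
      | some v => exact ⟨v, rfl⟩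
    obtain ⟨v, hv⟩ := hget
    have hvne : v ≠ [] := h.2 (k, v) (PySem.Dict.mem_items_of_get?_eq_some d hv)
    have hgd : d.getD k [] = v := PySem.Dict.getD_of_get?_eq_some d [] hv
    have hgphi : (pvPhi d).getD k "" = PySem.Str.join "|" v := by
      rw [PySem.Dict.getD_eq_get?_getD, pvPhi_get?, hv]; rfl
    rw [if_pos hc, hgphi, hgd]
    apply PySem.Dict.ext
    rw [PySem.Dict.items_insert_of_contains _ _ (by rw [pvPhi_contains]; exact hc)]
    show _ = (PySem.Dict.insert _ k (v ++ [s])).items.map _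
    rw [PySem.Dict.items_insert_of_contains _ _ hc]
    show List.map _ (d.items.map _) = List.map _ (d.items.map _)
    rw [List.map_map, List.map_map]
    apply List.map_congr_left
    intro p hp
    by_cases hpk : p.1 = k
    · simp [hpk, pvJoin_append hvne]
    · simp [hpk]
  · have hc' : d.contains k = false := by simpa using hc
    rw [if_neg hc, PySem.Dict.getD_of_not_contains d [] hc']
    apply PySem.Dict.ext
    rw [PySem.Dict.items_insert_of_not_contains _ _ (by rw [pvPhi_contains]; exact hc')]
    show _ = (PySem.Dict.insert _ k ([] ++ [s])).items.map _
    rw [PySem.Dict.items_insert_of_not_contains _ _ hc']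
    simp [pvPhi, pvJoin_singleton]

theorem pvInv_step (d : PySem.Dict String (List String)) (h : pvInv d) (k s : String) :
    pvInv (pvStepL d k s) := by
  refine ⟨PySem.Dict.nodup_keys_insert _ _ _ h.1, ?_⟩
  intro kv hkv
  rw [pvStepL, PySem.Dict.mem_items_insert] at hkv
  rcases hkv with h1 | h2
  · subst h1; simp
  · exact h.2 kv h2.1

theorem pvInv_empty : pvInv PySem.Dict.empty := ⟨List.nodup_nil, by intro kv h; cases h⟩

-- A's fold over pairs is the single-step fold over the flattened event list
theorem pvFoldA_flatten (pairs : List (String × String)) (d : PySem.Dict String String) :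
    pairs.foldl (fun d pair =>
      let source := pair.1
      let target := pair.2
      let d :=
        if d.contains target then d.insert target (d.getD target "" ++ "|" ++ source)
        else d.insert target source
      if d.contains source then d.insert source (d.getD source "" ++ "|" ++ target)
      else d.insert source target) d
    = (pvEvents pairs).foldl (fun d e => pvStepA d e.1 e.2) d := by
  induction pairs generalizing d with
  | nil => rfl
  | cons p ps ih => simpa [pvEvents, pvStepA] using ih _

-- the event fold of A's step is pvPhi of the list-valued fold
theorem pvFold_comm (es : List (String × String)) (d : PySem.Dict String (List String))
    (h : pvInv d) :
    es.foldl (fun d e => pvStepA d e.1 e.2) (pvPhi d)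
      = pvPhi (es.foldl (fun d e => pvStepL d e.1 e.2) d) := by
  induction es generalizing d with
  | nil => rfl
  | cons e rest ih =>
    simp only [List.foldl_cons]
    rw [pvStep_comm d h]
    exact ih _ (pvInv_step d h _ _)

-- characterization of B's group-by fold: lookups
theorem pvFoldB_get? (V : String → String) (es : List (String × String))
    (d : PySem.Dict String String) (k : String) :
    (es.foldl (fun d e => if d.contains e.1 then d else d.insert e.1 (V e.1)) d).get? k
      = if d.contains k then d.get? k
        else if k ∈ es.map (·.1) then some (V k) else none := by
  induction es generalizing d with
  | nil => by_cases h : d.contains k <;> simp [PySem.Dict.get?_eq_none_iff_contains, h]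
  | cons e rest ih =>
    simp only [List.foldl_cons]
    by_cases hc : d.contains e.1
    · rw [if_pos hc, ih]
      by_cases hk : d.contains k
      · simp [hk]
      · have hne : k ≠ e.1 := fun h => hk (h ▸ hc)
        have hcons : k ∈ e.1 :: List.map (fun x => x.1) rest ↔ k ∈ List.map (fun x => x.1) rest := by
          simp [List.mem_cons, hne]
        rw [if_neg hk, List.map_cons, if_congr hcons rfl rfl, if_neg hk]
    · rw [if_neg hc, ih]
      have hc' : d.contains e.1 = false := by simpa using hc
      by_cases hke : k = e.1
      · subst hke
        simp [hc', PySem.Dict.get?_insert_self]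
      · rw [PySem.Dict.get?_insert_of_ne _ _ hke]
        have : (d.insert e.1 (V e.1)).contains k = d.contains k := by
          simp [PySem.Dict.contains_insert, hke]
        rw [this]
        by_cases hk : d.contains k
        · simp [hk]
        · have hcons : k ∈ e.1 :: List.map (fun x => x.1) rest ↔ k ∈ List.map (fun x => x.1) rest := by
            simp [List.mem_cons, hke]
          rw [if_neg hk, List.map_cons, if_congr hcons rfl rfl, if_neg hk]

-- characterization of B's group-by fold: keys
theorem pvFoldB_keys (V : String → String) (es : List (String × String))
    (d : PySem.Dict String String) :
    (es.foldl (fun d e => if d.contains e.1 then d else d.insert e.1 (V e.1)) d).keys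
      = PySem.Set.update d.keys (es.map (·.1)) := by
  induction es generalizing d with
  | nil => rfl
  | cons e rest ih =>
    simp only [List.foldl_cons, List.map_cons, PySem.Set.update_cons]
    by_cases hc : d.contains e.1
    · rw [if_pos hc, ih, PySem.Set.add_of_mem (Iff.mp (PySem.Dict.contains_iff_mem_keys _ _) hc)]
    · have hc' : d.contains e.1 = false := by simpa using hc
      rw [if_neg hc, ih, PySem.Dict.keys_insert_of_not_contains _ _ hc',
        PySem.Set.add_of_not_mem (fun hm => hc (Iff.mpr (PySem.Dict.contains_iff_mem_keys _ _) hm))]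

-- keys of the list-valued fold
theorem pvFoldL_keys (es : List (String × String)) (d : PySem.Dict String (List String)) :
    (es.foldl (fun d e => pvStepL d e.1 e.2) d).keys
      = PySem.Set.update d.keys (es.map (·.1)) := by
  induction es generalizing d with
  | nil => rfl
  | cons e rest ih =>
    simp only [List.foldl_cons, List.map_cons, PySem.Set.update_cons]
    rw [ih]
    congr 1
    unfold pvStepL
    by_cases hc : d.contains e.1
    · rw [PySem.Dict.keys_insert_of_contains _ _ hc,
        PySem.Set.add_of_mem (Iff.mp (PySem.Dict.contains_iff_mem_keys _ _) hc)]
    · have hc' : d.contains e.1 = false := by simpa using hc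
      rw [PySem.Dict.keys_insert_of_not_contains _ _ hc',
        PySem.Set.add_of_not_mem (fun hm => hc (Iff.mpr (PySem.Dict.contains_iff_mem_keys _ _) hm))]

-- values of the list-valued fold (from empty): all partners of the key, in order
theorem pvFoldL_getD (es : List (String × String)) (d : PySem.Dict String (List String))
    (k : String) :
    (es.foldl (fun d e => pvStepL d e.1 e.2) d).getD k []
      = d.getD k [] ++ (es.filter (fun e2 => e2.1 == k)).map (·.2) := by
  induction es generalizing d with
  | nil => simp
  | cons e rest ih =>
    simp only [List.foldl_cons, List.filter_cons]
    rw [ih]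
    by_cases hke : e.1 = k
    · subst hke
      simp [pvStepL, PySem.Dict.getD_insert_self]
    · have : (pvStepL d e.1 e.2).getD k [] = d.getD k [] := by
        unfold pvStepL
        exact PySem.Dict.getD_insert_of_ne _ _ _ (fun h => hke h.symm)
      simp [this, hke]

-- the two result dicts are equal
theorem pvDicts_eq (pairs : List (String × String)) :
    pairs.foldl (fun d pair =>
      let source := pair.1
      let target := pair.2
      let d :=
        if d.contains target then d.insert target (d.getD target "" ++ "|" ++ source)
        else d.insert target source
      if d.contains source then d.insert source (d.getD source "" ++ "|" ++ target)
      else d.insert source target) PySem.Dict.empty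
    = (pvEvents pairs).foldl
        (fun d e => if d.contains e.1 then d else d.insert e.1 (pvJoined (pvEvents pairs) e.1))
        PySem.Dict.empty := by
  set es := pvEvents pairs with hes
  rw [pvFoldA_flatten]
  rw [← hes]
  set L := es.foldl (fun d e => pvStepL d e.1 e.2) PySem.Dict.empty with hL
  have hcomm : es.foldl (fun d e => pvStepA d e.1 e.2) PySem.Dict.empty = pvPhi L :=
    pvFold_comm es PySem.Dict.empty pvInv_empty
  rw [hcomm]
  set R := es.foldl (fun d e => if d.contains e.1 then d else d.insert e.1 (pvJoined es e.1))
      PySem.Dict.empty with hR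
  have hLkeys : L.keys = PySem.Set.ofList (es.map (·.1)) := by
    rw [hL, pvFoldL_keys]
    simp [PySem.Dict.keys, PySem.Dict.empty, PySem.Set.update_nil_left]
  have hRkeys : R.keys = PySem.Set.ofList (es.map (·.1)) := by
    rw [hR, pvFoldB_keys]
    simp [PySem.Dict.keys, PySem.Dict.empty, PySem.Set.update_nil_left]
  have hnodup : L.keys.Nodup := by rw [hLkeys]; exact PySem.Set.nodup_ofList _
  have hRnodup : R.keys.Nodup := by rw [hRkeys]; exact PySem.Set.nodup_ofList _
  have hPhikeys : (pvPhi L).keys = L.keys := pvPhi_keys L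
  apply PySem.Dict.ext
  rw [PySem.Dict.items_eq_map_keys (pvPhi L) (hPhikeys ▸ hnodup) "",
    PySem.Dict.items_eq_map_keys R hRnodup "", hPhikeys, hLkeys, hRkeys]
  apply List.map_congr_left
  intro k hk
  have hkmem : k ∈ es.map (·.1) := Iff.mp (PySem.Set.mem_ofList _ _) hk
  have hkL : k ∈ L.keys := by rw [hLkeys]; exact hk
  have hLc : L.contains k = true := Iff.mpr (PySem.Dict.contains_iff_mem_keys _ _) hkL
  have hLget : ∃ v, L.get? k = some v := by
    rw [PySem.Dict.contains_eq_isSome_get?] at hLc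
    cases hv : L.get? k with
    | none => rw [hv] at hLc; simp at hLc
    | some v => exact ⟨v, rfl⟩
  obtain ⟨v, hv⟩ := hLget
  have hvval : v = (es.filter (fun e2 => e2.1 == k)).map (·.2) := by
    have := pvFoldL_getD es PySem.Dict.empty k
    rw [← hL] at this
    rw [PySem.Dict.getD_of_get?_eq_some L [] hv] at this
    simpa using this
  have hA : (pvPhi L).getD k "" = PySem.Str.join "|" v := by
    rw [PySem.Dict.getD_eq_get?_getD, pvPhi_get?, hv]; rfl
  have hB : R.getD k "" = pvJoined es k := by
    rw [PySem.Dict.getD_eq_get?_getD, hR, pvFoldB_get?]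
    simp [PySem.Dict.contains_empty, hkmem]
  rw [hA, hB, hvval]
  rfl

-- ===== VERDICT (by name: the statement is the Claim_ definition above) =====
theorem store_redundant_pairs_spec : Claim_equal_store_redundant_pairs := by
  intro lsv_dict pairs _
  unfold Spec_store_redundant_pairs store_redundant_pairs store_redundant_pairs_alt
  exact congrArg (fun r => (lsv_dict,
    (lsv_dict.foldl (fun d kv => if d.contains kv.1 then d else d.insert kv.1 "NaN") r).items))
    (pvDicts_eq pairs)
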